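-- pv_equiv track=rewrite | github.com/hunterzju/leetcode_alg | leetcode/s43.py | BignumMultiplyDigit
-- ===== SOURCE A (Python) =====
-- def BignumMultiplyDigit(num_str, dig):
--     num_str = num_str[::-1]
--     res_str = ''
--     ci = 0
--     for ch in num_str:
--         tmp_multi = int(ch) * int(dig) + ci
--         ci = tmp_multi // 10
--         res_str += str(tmp_multi % 10)
--     if ci != 0:
--         res_str += str(ci)
--     return res_str[::-1]
-- ===== SOURCE B (Python) =====
-- def BignumMultiplyDigit(num_str, dig):
--     if not num_str:
--         return ''
--     d = int(dig)
--     n = 0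
--     for ch in num_str:
--         n = 10 * n + int(ch)
--     total = n * d
--     out = []
--     for _ in range(len(num_str)):
--         total, r = divmod(total, 10)
--         out.append(str(r))
--     if total != 0:
--         out.append(str(total))
--     return ''.join(out)[::-1]
-- ===== Notes on version B (the rewrite author's own statement) =====
-- stated objective: alternative
-- what changed: A does digit-by-digit long multiplication with carry over the reversed string; B parses num_str into one integer with Horner's rule, multiplies once, and re-extracts the result's digits by repeated divmod, appending the leftover high part like A before the final reversal.
import Mathlib
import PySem

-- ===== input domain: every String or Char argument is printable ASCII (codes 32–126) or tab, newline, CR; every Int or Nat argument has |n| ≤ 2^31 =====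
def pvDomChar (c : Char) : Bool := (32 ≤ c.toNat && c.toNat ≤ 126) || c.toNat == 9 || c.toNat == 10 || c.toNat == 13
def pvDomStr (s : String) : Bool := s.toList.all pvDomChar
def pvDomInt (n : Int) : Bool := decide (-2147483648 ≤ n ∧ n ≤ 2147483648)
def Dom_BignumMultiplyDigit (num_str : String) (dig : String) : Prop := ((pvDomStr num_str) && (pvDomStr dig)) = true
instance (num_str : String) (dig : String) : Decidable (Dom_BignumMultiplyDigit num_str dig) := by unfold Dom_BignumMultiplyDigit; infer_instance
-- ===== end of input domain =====

-- B replaces A's digit-by-digit multiply-with-carry by parse–multiply–reformat: it evaluates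
-- num_str to one integer (Horner), multiplies once, and re-extracts the digits by repeated divmod;
-- alternative algorithm, same results.

-- int(ch) for a SINGLE character: exact exactly on digit characters '0'..'9';
-- Pre_ restricts num_str to digit characters (elsewhere Python raises ValueError).
def pvIntChar (c : Char) : Int := (c.toNat : Int) - 48

-- ===== PORT A =====
def BignumMultiplyDigit (num_str : String) (dig : String) : String :=
  -- num_str = num_str[::-1]  (s[::-1] is reversal)
  let rev := num_str.toList.reverse
  -- res_str = ''; ci = 0; for ch in num_str: tmp = int(ch)*int(dig)+ci; ci = tmp//10; res_str += str(tmp%10)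
  let st := rev.foldl (fun (st : List Char × Int) ch =>
      match PySem.Int.ofStr? dig with   -- int(dig) each iteration; none = ValueError, excluded by Pre_
      | none => st
      | some d =>
        let tmp := pvIntChar ch * d + st.2
        (st.1 ++ PySem.Int.toChars (PySem.Int.mod tmp 10), PySem.Int.floordiv tmp 10))
    ([], 0)
  -- if ci != 0: res_str += str(ci);  return res_str[::-1]
  let res := if st.2 ≠ 0 then st.1 ++ PySem.Int.toChars st.2 else st.1
  String.ofList res.reverse

-- ===== PORT B =====
def BignumMultiplyDigit_alt (num_str : String) (dig : String) : String :=
  -- if not num_str: return ''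
  if num_str.toList = [] then "" else
  -- d = int(dig)  (none = ValueError, excluded by Pre_)
  match PySem.Int.ofStr? dig with
  | none => ""
  | some d =>
    -- n = 0; for ch in num_str: n = 10 * n + int(ch)
    let n := num_str.toList.foldl (fun a ch => 10 * a + pvIntChar ch) 0
    -- total = n * d
    -- out = []; for _ in range(len(num_str)): total, r = divmod(total, 10); out.append(str(r))
    let st := (List.range num_str.toList.length).foldl
      (fun (st : Int × List (List Char)) _ =>
        (PySem.Int.floordiv st.1 10, st.2 ++ [PySem.Int.toChars (PySem.Int.mod st.1 10)]))
      (n * d, [])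
    -- if total != 0: out.append(str(total))
    let pieces := if st.1 ≠ 0 then st.2 ++ [PySem.Int.toChars st.1] else st.2
    -- return ''.join(out)[::-1]
    String.ofList (PySem.Chars.join [] pieces).reverse

-- ===== PRECONDITION & SPEC =====
-- Pre_ excludes exactly the inputs where Python A raises ValueError: a non-digit character in
-- num_str, or (when num_str is non-empty, so int(dig) is reached) a dig that int() cannot parse.
def Pre_BignumMultiplyDigit (num_str : String) (dig : String) : Prop :=
  num_str.toList.all Char.isDigit = true ∧
    (num_str.toList = [] ∨ (PySem.Int.ofStr? dig).isSome = true)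
instance (num_str : String) (dig : String) : Decidable (Pre_BignumMultiplyDigit num_str dig) := by
  unfold Pre_BignumMultiplyDigit; infer_instance

def pvWitness_BignumMultiplyDigit : String × String := ("123", "7")

def Spec_BignumMultiplyDigit (num_str : String) (dig : String) (out : String) : Prop := out = BignumMultiplyDigit_alt num_str dig
instance (num_str : String) (dig : String) (out : String) : Decidable (Spec_BignumMultiplyDigit num_str dig out) := by unfold Spec_BignumMultiplyDigit; infer_instance

-- ===== CLAIM (what is proved, stated in full; the proofs are below) =====
def Claim_equal_BignumMultiplyDigit : Prop := ∀ (num_str : String) (dig : String), Dom_BignumMultiplyDigit num_str dig → Pre_BignumMultiplyDigit num_str dig → Spec_BignumMultiplyDigit num_str dig (BignumMultiplyDigit num_str dig)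

-- ===== LEMMAS AND PROOFS =====

-- value of a low-order-first digit list
def pvVLow : List Char → Int
  | [] => 0
  | c :: t => pvIntChar c + 10 * pvVLow t

-- the digit pieces B emits in L rounds of divmod on t, low digit first
def pvBDigits : Int → Nat → List (List Char)
  | _, 0 => []
  | t, k + 1 => PySem.Int.toChars (PySem.Int.mod t 10) :: pvBDigits (PySem.Int.floordiv t 10) k

-- the integer left after k rounds of //10
def pvIterDiv : Int → Nat → Int
  | t, 0 => t
  | t, k + 1 => pvIterDiv (PySem.Int.floordiv t 10) k

lemma pvFd (x y : Int) : PySem.Int.floordiv (x + 10 * y) 10 = y + PySem.Int.floordiv x 10 := by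
  rw [PySem.Int.floordiv_eq_ediv_of_pos (by norm_num),
      PySem.Int.floordiv_eq_ediv_of_pos (by norm_num)]
  omega

lemma pvMd (x y : Int) : PySem.Int.mod (x + 10 * y) 10 = PySem.Int.mod x 10 := by
  rw [PySem.Int.mod_eq_emod_of_pos (by norm_num), PySem.Int.mod_eq_emod_of_pos (by norm_num)]
  omega

-- ''.join is flatten
lemma pvJoin_nil_eq_flatten (ps : List (List Char)) : PySem.Chars.join [] ps = ps.flatten := by
  show List.intercalate [] ps = ps.flatten
  unfold List.intercalate
  induction ps with
  | nil => rfl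
  | cons h t ih =>
    cases t with
    | nil => simp
    | cons h2 t2 => simpa using ih

-- A's carry loop over the low-first digit list r, started with carry ci, emits exactly the
-- pieces of pvBDigits on the total value, and ends with the iterated quotient as its carry.
lemma pvLoopA (d : Int) (r : List Char) : ∀ (ci : Int) (acc : List Char),
    r.foldl (fun (st : List Char × Int) ch =>
        (st.1 ++ PySem.Int.toChars (PySem.Int.mod (pvIntChar ch * d + st.2) 10),
         PySem.Int.floordiv (pvIntChar ch * d + st.2) 10)) (acc, ci)
    = (acc ++ (pvBDigits (pvVLow r * d + ci) r.length).flatten,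
       pvIterDiv (pvVLow r * d + ci) r.length) := by
  induction r with
  | nil => intro ci acc; simp [pvVLow, pvBDigits, pvIterDiv]
  | cons c t ih =>
    intro ci acc
    simp only [List.foldl_cons, List.length_cons]
    rw [ih]
    have hv : pvVLow (c :: t) * d + ci
        = (pvIntChar c * d + ci) + 10 * (pvVLow t * d) := by
      simp [pvVLow]; ring
    have hm : PySem.Int.mod (pvVLow (c :: t) * d + ci) 10
        = PySem.Int.mod (pvIntChar c * d + ci) 10 := by rw [hv, pvMd]
    have hf : PySem.Int.floordiv (pvVLow (c :: t) * d + ci) 10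
        = pvVLow t * d + PySem.Int.floordiv (pvIntChar c * d + ci) 10 := by
      rw [hv, pvFd]
    simp only [pvBDigits, pvIterDiv, List.flatten_cons, hm, hf, List.append_assoc]

-- B's divmod loop (the element of range is ignored) computes pvBDigits / pvIterDiv.
lemma pvBDigits_snoc (k : Nat) : ∀ t : Int, pvBDigits t (k + 1)
    = pvBDigits t k ++ [PySem.Int.toChars (PySem.Int.mod (pvIterDiv t k) 10)] := by
  induction k with
  | zero => intro t; simp [pvBDigits, pvIterDiv]
  | succ k ih =>
    intro t
    show PySem.Int.toChars (PySem.Int.mod t 10) :: pvBDigits (PySem.Int.floordiv t 10) (k + 1) = _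
    rw [ih]
    simp [pvBDigits, pvIterDiv]

lemma pvIterDiv_succ (k : Nat) : ∀ t : Int,
    pvIterDiv t (k + 1) = PySem.Int.floordiv (pvIterDiv t k) 10 := by
  induction k with
  | zero => intro t; rfl
  | succ k ih =>
    intro t
    show pvIterDiv (PySem.Int.floordiv t 10) (k + 1) = _
    rw [ih]
    rfl

lemma pvLoopB (total : Int) (L : Nat) :
    (List.range L).foldl
      (fun (st : Int × List (List Char)) _ =>
        (PySem.Int.floordiv st.1 10, st.2 ++ [PySem.Int.toChars (PySem.Int.mod st.1 10)]))
      (total, [])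
    = (pvIterDiv total L, pvBDigits total L) := by
  induction L with
  | zero => simp [pvIterDiv, pvBDigits]
  | succ k ih =>
    rw [List.range_succ, List.foldl_append, ih]
    simp only [List.foldl_cons, List.foldl_nil]
    rw [← pvIterDiv_succ, ← pvBDigits_snoc]

-- Horner evaluation over the string equals the low-first value of its reversal.
lemma pvVLow_snoc (c : Char) : ∀ xs : List Char,
    pvVLow (xs ++ [c]) = pvVLow xs + pvIntChar c * 10 ^ xs.length := by
  intro xs
  induction xs with
  | nil => simp [pvVLow]
  | cons x t ih => simp [pvVLow, ih, pow_succ]; ring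

lemma pvHorner (l : List Char) : ∀ a : Int,
    l.foldl (fun a ch => 10 * a + pvIntChar ch) a = a * 10 ^ l.length + pvVLow l.reverse := by
  induction l with
  | nil => intro a; simp [pvVLow]
  | cons c t ih =>
    intro a
    simp only [List.foldl_cons, List.length_cons, List.reverse_cons]
    rw [ih, pvVLow_snoc]
    simp [pow_succ]
    ring

-- ===== VERDICT (by name: the statement is the Claim_ definition above) =====
theorem BignumMultiplyDigit_spec : Claim_equal_BignumMultiplyDigit := by
  intro ns dig _hDom hPre
  obtain ⟨_hdig, h2⟩ := hPre
  unfold Spec_BignumMultiplyDigit BignumMultiplyDigit BignumMultiplyDigit_alt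
  by_cases hnil : ns.toList = []
  · simp [hnil]
  · have hsome : (PySem.Int.ofStr? dig).isSome = true := by
      cases h2 with
      | inl h => exact absurd h hnil
      | inr h => exact h
    obtain ⟨d, hd⟩ := Option.isSome_iff_exists.mp hsome
    simp only [hd, if_neg hnil]
    have hA := pvLoopA d ns.toList.reverse 0 []
    have hB := pvLoopB ((ns.toList.foldl (fun a ch => 10 * a + pvIntChar ch) 0) * d)
        ns.toList.length
    have hn : ns.toList.foldl (fun a ch => 10 * a + pvIntChar ch) 0 = pvVLow ns.toList.reverse := by
      rw [pvHorner]; simp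
    rw [hA, hB, hn]
    simp only [List.length_reverse, List.nil_append, add_zero]
    rw [pvJoin_nil_eq_flatten]
    split_ifs with hc
    · simp [List.flatten_append]
    · rfl
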